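-- pv_equiv track=rewrite | github.com/walterdejong/synctool | src/synctool/lib.py | dryrun_msg
-- ===== SOURCE A (Python) =====
-- DRY_RUN = True      # type: bool
--
-- def dryrun_msg(msg):
--     # type: (str) -> str
--     '''print a "dry run" message filled to (almost) 80 chars'''
--
--     if not DRY_RUN:
--         return msg
--
--     lmessage = len(msg) + 4
--
--     add = '# dry run'
--     laddition = len(add)
--
--     i = 0
--     while i < 4:
--         # format output; align columns by steps of 20
--         col = 79 + i * 20
--         if lmessage + laddition <= col:
--             return msg + (' ' * (col - (lmessage + laddition))) + add
--
--         i += 1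
--
--     # else return a longer message
--     return msg + '    ' + add
-- ===== SOURCE B (Python) =====
-- DRY_RUN = True      # type: bool
--
-- def dryrun_msg(msg):
--     # type: (str) -> str
--     '''print a "dry run" message filled to (almost) 80 chars'''
--
--     if not DRY_RUN:
--         return msg
--
--     add = '# dry run'
--     total = len(msg) + 4 + len(add)
--
--     # target column in closed form: smallest 79 + 20*i (i >= 0) that fits
--     i = 0 if total <= 79 else -((79 - total) // 20)   # = ceil((total - 79) / 20)
--     if i <= 3:
--         return msg + ' ' * (79 + 20 * i - total) + add
--
--     # message too long for any aligned column
--     return msg + '    ' + add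
-- ===== Notes on version B (the rewrite author's own statement) =====
-- stated objective: alternative
-- what changed: Replaced the while-loop search over columns 79/99/119/139 with a closed-form ceiling-division computation of the target column index.
import Mathlib
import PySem

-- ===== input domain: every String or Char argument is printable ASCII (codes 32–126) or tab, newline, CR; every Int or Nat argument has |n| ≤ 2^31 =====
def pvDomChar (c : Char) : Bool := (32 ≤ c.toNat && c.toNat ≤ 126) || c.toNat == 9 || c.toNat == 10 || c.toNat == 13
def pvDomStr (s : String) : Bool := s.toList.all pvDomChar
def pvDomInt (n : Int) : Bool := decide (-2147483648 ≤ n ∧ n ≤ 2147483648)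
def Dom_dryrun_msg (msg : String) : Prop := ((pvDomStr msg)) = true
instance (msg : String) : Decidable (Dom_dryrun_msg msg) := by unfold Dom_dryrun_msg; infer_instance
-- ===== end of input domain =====

-- B replaces A's while-loop search over columns with a closed-form ceiling-division formula (alternative decomposition, same cost).

-- ===== PORT A =====
def DRY_RUN : Bool := true

-- the 'while i < 4' loop of A, step for step; terminates since i increases towards 4
def dryrunLoopA (msg add : List Char) (lmessage laddition : Int) (i : Int) : List Char :=
  if _h : i < 4 then
    let col := 79 + i * 20
    if lmessage + laddition ≤ col then
      msg ++ List.replicate (col - (lmessage + laddition)).toNat ' ' ++ add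
    else
      dryrunLoopA msg add lmessage laddition (i + 1)
  else
    msg ++ "    ".toList ++ add
termination_by (4 - i).toNat
decreasing_by omega

def dryrun_msg (msg : String) : String :=
  if !DRY_RUN then msg
  else
    let lmessage : Int := PySem.Str.len msg + 4
    let add : List Char := "# dry run".toList
    let laddition : Int := (add.length : Int)
    String.ofList (dryrunLoopA msg.toList add lmessage laddition 0)

-- ===== PORT B =====
def dryrun_msg_alt (msg : String) : String :=
  if !DRY_RUN then msg
  else
    let add : List Char := "# dry run".toList
    let total : Int := PySem.Str.len msg + 4 + (add.length : Int)
    let i : Int := if total ≤ 79 then 0 else -(PySem.Int.floordiv (79 - total) 20)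
    if i ≤ 3 then
      String.ofList (msg.toList ++ List.replicate (79 + 20 * i - total).toNat ' ' ++ add)
    else
      String.ofList (msg.toList ++ "    ".toList ++ add)

-- ===== PRECONDITION & SPEC =====
def Spec_dryrun_msg (msg : String) (out : String) : Prop := out = dryrun_msg_alt msg
instance (msg : String) (out : String) : Decidable (Spec_dryrun_msg msg out) := by unfold Spec_dryrun_msg; infer_instance

-- ===== CLAIM (what is proved, stated in full; the proofs are below) =====
def Claim_equal_dryrun_msg : Prop := ∀ (msg : String), Dom_dryrun_msg msg → Spec_dryrun_msg msg (dryrun_msg msg)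

-- ===== LEMMAS AND PROOFS =====

lemma loop_step (msg add : List Char) (lm la i : Int) (h : i < 4) :
    dryrunLoopA msg add lm la i =
      if lm + la ≤ 79 + i * 20 then
        msg ++ List.replicate (79 + i * 20 - (lm + la)).toNat ' ' ++ add
      else dryrunLoopA msg add lm la (i + 1) := by
  rw [dryrunLoopA]; simp [h]

lemma loop_end (msg add : List Char) (lm la i : Int) (h : ¬ i < 4) :
    dryrunLoopA msg add lm la i = msg ++ "    ".toList ++ add := by
  rw [dryrunLoopA]; simp [h]

theorem dryrun_eq (msg : String) : dryrun_msg msg = dryrun_msg_alt msg := by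
  simp only [dryrun_msg, dryrun_msg_alt, DRY_RUN, Bool.not_true, Bool.false_eq_true, if_false,
    PySem.Str.len_eq]
  have h9 : (("# dry run".toList.length : Nat) : Int) = 9 := by decide
  rw [h9]
  set n : Int := (msg.toList.length : Int) with hn
  have hn0 : 0 ≤ n := Int.natCast_nonneg _
  have key : ∀ q : Int, (q - 1) * 20 < n + 13 - 79 → n + 13 - 79 ≤ q * 20 →
      -(PySem.Int.floordiv (79 - (n + 4 + 9)) 20) = q := by
    intro q hq1 hq2
    have h79 : (79 - (n + 4 + 9)) = -((n + 13) - 79) := by ring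
    rw [h79, PySem.Int.neg_floordiv_neg_eq_iff_of_pos (by omega)]
    exact ⟨hq1, hq2⟩
  by_cases h1 : n + 4 + 9 ≤ 79
  · simp only [if_pos h1]
    rw [if_pos (by norm_num : (0:Int) ≤ 3)]
    rw [loop_step _ _ _ _ 0 (by norm_num), if_pos (by omega)]
    norm_num
  by_cases h2 : n + 4 + 9 ≤ 99
  · simp only [if_neg h1, key 1 (by omega) (by omega)]
    rw [if_pos (by norm_num : (1:Int) ≤ 3)]
    rw [loop_step _ _ _ _ 0 (by norm_num), if_neg (by omega),
      show (0:Int) + 1 = 1 from by norm_num,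
      loop_step _ _ _ _ 1 (by norm_num), if_pos (by omega)]
    norm_num
  by_cases h3 : n + 4 + 9 ≤ 119
  · simp only [if_neg h1, key 2 (by omega) (by omega)]
    rw [if_pos (by norm_num : (2:Int) ≤ 3)]
    rw [loop_step _ _ _ _ 0 (by norm_num), if_neg (by omega),
      show (0:Int) + 1 = 1 from by norm_num,
      loop_step _ _ _ _ 1 (by norm_num), if_neg (by omega),
      show (1:Int) + 1 = 2 from by norm_num,
      loop_step _ _ _ _ 2 (by norm_num), if_pos (by omega)]
    norm_num
  by_cases h4 : n + 4 + 9 ≤ 139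
  · simp only [if_neg h1, key 3 (by omega) (by omega)]
    rw [if_pos (by norm_num : (3:Int) ≤ 3)]
    rw [loop_step _ _ _ _ 0 (by norm_num), if_neg (by omega),
      show (0:Int) + 1 = 1 from by norm_num,
      loop_step _ _ _ _ 1 (by norm_num), if_neg (by omega),
      show (1:Int) + 1 = 2 from by norm_num,
      loop_step _ _ _ _ 2 (by norm_num), if_neg (by omega),
      show (2:Int) + 1 = 3 from by norm_num,
      loop_step _ _ _ _ 3 (by norm_num), if_pos (by omega)]
    norm_num
  · have hfd : PySem.Int.floordiv (79 - (n + 4 + 9)) 20 < -3 := by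
      rw [PySem.Int.floordiv_lt_iff_lt_mul (by norm_num)]
      omega
    simp only [if_neg h1]
    rw [if_neg (by omega : ¬ -(PySem.Int.floordiv (79 - (n + 4 + 9)) 20) ≤ 3)]
    rw [loop_step _ _ _ _ 0 (by norm_num), if_neg (by omega),
      show (0:Int) + 1 = 1 from by norm_num,
      loop_step _ _ _ _ 1 (by norm_num), if_neg (by omega),
      show (1:Int) + 1 = 2 from by norm_num,
      loop_step _ _ _ _ 2 (by norm_num), if_neg (by omega),
      show (2:Int) + 1 = 3 from by norm_num,
      loop_step _ _ _ _ 3 (by norm_num), if_neg (by omega),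
      show (3:Int) + 1 = 4 from by norm_num,
      loop_end _ _ _ _ 4 (by norm_num)]

-- ===== VERDICT (by name: the statement is the Claim_ definition above) =====
theorem dryrun_msg_spec : Claim_equal_dryrun_msg := by
  intro msg _
  exact dryrun_eq msg
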